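-- pv_equiv track=rewrite | github.com/grimm-co/killerbeez | python/manager/lib/fuzzer.py | bat_escape
-- ===== SOURCE A (Python) =====
-- def bat_escape(args):
--     """Quote a set of arguments for a windows command line.
--
--     Double-quote each argument, and backslash-escape any backslashes before
--     double quotes and the double quotes themselves. Finally, put a ^ before
--     each shell metacharacter so it will survive cmd.exe. Based on the algorithm in
--     https://blogs.msdn.microsoft.com/twistylittlepassagesallalike/2011/04/23/everyone-quotes-command-line-arguments-the-wrong-way/
--     """
--     escaped_args = []
--     for arg in args:
--         escaped_parts = ['"']
--         num_backslashes = 0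
--         for c in arg:
--             if c == '\\':
--                 num_backslashes += 1
--             elif c == '"':
--                 escaped_parts.append('\\'*(2*num_backslashes+1) + c)
--                 num_backslashes = 0
--             else:
--                 escaped_parts.append('\\'*num_backslashes + c)
--                 num_backslashes = 0
--         escaped_parts.append('\\'*(2*num_backslashes) + '"')
--         escaped_args.append(''.join(escaped_parts))
--     final_cmdline = ' '.join(escaped_args)
--
--     # That is what we want to be passed to CreateProcess; however, cmd is going
--     # to mangle it first so we must escape all chars it considers special.
--     metachars = ['(', ')', '%', '!', '^', '"', '<', '>', '&', '|']
--     for char in metachars: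
--         final_cmdline = final_cmdline.replace(char, '^'+char)
--     return '%1 {}'.format(final_cmdline)
-- ===== SOURCE B (Python) =====
-- def bat_escape(args):
--     """Quote a set of arguments for a windows command line.
--
--     Right-to-left scan with a doubling flag instead of a backslash counter,
--     and one single-pass metacharacter escape instead of ten sequential
--     replaces (reproducing their composed effect exactly).
--     """
--     def quote(arg):
--         pieces = []
--         dbl = True  # trailing backslashes (before end-quote) must double
--         for c in reversed(arg):
--             if c == '\\':
--                 pieces.append('\\\\' if dbl else '\\')
--             elif c == '"':
--                 pieces.append('"\\')
--                 dbl = True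
--             else:
--                 pieces.append(c)
--                 dbl = False
--         return '"' + ''.join(pieces)[::-1] + '"'
--
--     def esc_char(c):
--         # composed effect of A's sequential replaces: carets inserted for
--         # ( ) % ! are themselves doubled by the later '^' replace
--         if c in '()%!':
--             return '^^' + c
--         if c == '^':
--             return '^^'
--         if c in '"<>&|':
--             return '^' + c
--         return c
--
--     cmdline = ' '.join(quote(arg) for arg in args)
--     return '%1 ' + ''.join(esc_char(c) for c in cmdline)
-- ===== Notes on version B (the rewrite author's own statement) =====
-- stated objective: alternative
-- what changed: Each argument is quoted by a right-to-left scan with a boolean doubling flag instead of A's left-to-right backslash counter, and the ten sequential metacharacter .replace passes are fused into one single-pass per-character escape that reproduces their composed effect (including the doubling of carets inserted before ( ) % !).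
import Mathlib
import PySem

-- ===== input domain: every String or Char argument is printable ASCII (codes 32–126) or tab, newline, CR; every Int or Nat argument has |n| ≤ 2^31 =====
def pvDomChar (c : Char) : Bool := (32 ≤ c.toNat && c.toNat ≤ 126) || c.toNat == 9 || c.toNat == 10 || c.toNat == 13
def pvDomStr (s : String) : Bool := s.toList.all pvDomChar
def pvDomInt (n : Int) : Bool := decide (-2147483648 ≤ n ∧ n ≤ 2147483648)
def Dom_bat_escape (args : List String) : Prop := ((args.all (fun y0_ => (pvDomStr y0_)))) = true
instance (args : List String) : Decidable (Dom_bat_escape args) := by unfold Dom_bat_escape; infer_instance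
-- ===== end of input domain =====

-- B replaces A's left-to-right backslash counter by a right-to-left scan with a doubling
-- flag, and A's ten sequential metacharacter replaces by one single-pass per-char escape
-- that reproduces the composed effect of the sequential replaces exactly.

-- ===== PORT A =====
-- inner loop body of A ('for c in arg'), state = (escaped_parts, num_backslashes)
def pvStepA (st : List (List Char) × Nat) (c : Char) : List (List Char) × Nat :=
  if c = '\\' then (st.1, st.2 + 1)
  else if c = '"' then (st.1 ++ [List.replicate (2 * st.2 + 1) '\\' ++ [c]], 0)
  else (st.1 ++ [List.replicate st.2 '\\' ++ [c]], 0)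

-- one iteration of A's outer 'for arg in args': escaping of one arg, ''.join included
def pvEscArgA (arg : String) : List Char :=
  let st := arg.toList.foldl pvStepA ([['"']], 0)
  PySem.Chars.join [] (st.1 ++ [List.replicate (2 * st.2) '\\' ++ ['"']])

def bat_escape (args : List String) : String :=
  let escapedArgs := args.foldl (fun acc arg => acc ++ [pvEscArgA arg]) []
  let finalCmdline := PySem.Chars.join [' '] escapedArgs
  let finalCmdline := ['(', ')', '%', '!', '^', '"', '<', '>', '&', '|'].foldl
    (fun s ch => PySem.Chars.replace s [ch] ['^', ch]) finalCmdline
  String.ofList ('%' :: '1' :: ' ' :: finalCmdline)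

-- ===== PORT B =====
-- loop body of B's 'for c in reversed(arg)', state = (pieces, dbl)
def pvStepB (st : List (List Char) × Bool) (c : Char) : List (List Char) × Bool :=
  if c = '\\' then (st.1 ++ [if st.2 then ['\\', '\\'] else ['\\']], st.2)
  else if c = '"' then (st.1 ++ [['"', '\\']], true)
  else (st.1 ++ [[c]], false)

-- B's quote(arg): '"' + ''.join(pieces)[::-1] + '"'  ([::-1] is List.reverse,
-- PySem.List.slice?_none_none_neg_one)
def pvQuoteArg (arg : String) : List Char :=
  let st := arg.toList.reverse.foldl pvStepB ([], true)
  '"' :: (PySem.Chars.join [] st.1).reverse ++ ['"']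

-- B's esc_char
def pvMetaEsc (c : Char) : List Char :=
  if ['(', ')', '%', '!'].contains c then ['^', '^', c]
  else if c = '^' then ['^', '^']
  else if ['"', '<', '>', '&', '|'].contains c then ['^', c]
  else [c]

def bat_escape_alt (args : List String) : String :=
  let cmdline := PySem.Chars.join [' '] (args.map pvQuoteArg)
  String.ofList ('%' :: '1' :: ' ' :: cmdline.flatMap pvMetaEsc)

-- ===== PRECONDITION & SPEC =====
def Spec_bat_escape (args : List String) (out : String) : Prop := out = bat_escape_alt args
instance (args : List String) (out : String) : Decidable (Spec_bat_escape args out) := by unfold Spec_bat_escape; infer_instance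

-- ===== CLAIM (what is proved, stated in full; the proofs are below) =====
def Claim_equal_bat_escape : Prop := ∀ (args : List String), Dom_bat_escape args → Spec_bat_escape args (bat_escape args)

-- ===== LEMMAS AND PROOFS =====

-- ''.join is List.flatten
theorem pv_join_nil (L : List (List Char)) : PySem.Chars.join [] L = L.flatten := by
  induction L with
  | nil => simp [PySem.Chars.join, List.intercalate]
  | cons a L ih =>
    cases L with
    | nil => simp [PySem.Chars.join, List.intercalate]
    | cons b r => rw [PySem.Chars.join_cons_cons]; simp [ih]

-- common midpoint: escape of cs with n pending backslashes; d = whether a trailing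
-- backslash run is doubled (end-of-arg context)
def pvEfl : List Char → Nat → Bool → List Char
  | [], n, d => List.replicate ((if d then 2 else 1) * n) '\\'
  | c :: t, n, d =>
    if c = '\\' then pvEfl t (n + 1) d
    else if c = '"' then List.replicate (2 * n + 1) '\\' ++ c :: pvEfl t 0 d
    else List.replicate n '\\' ++ c :: pvEfl t 0 d

-- A's inner loop computes pvEfl (… true), with the closing 2n backslashes and quote
theorem pv_foldlA (cs : List Char) : ∀ (P : List (List Char)) (n : Nat),
    (cs.foldl pvStepA (P, n)).1.flatten ++
      List.replicate (2 * (cs.foldl pvStepA (P, n)).2) '\\' ++ ['"']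
    = P.flatten ++ pvEfl cs n true ++ ['"'] := by
  induction cs with
  | nil => intro P n; rfl
  | cons c t ih =>
    intro P n
    simp only [List.foldl_cons, pvStepA, pvEfl]
    by_cases h1 : c = '\\'
    · simp only [if_pos h1, ih]
    · by_cases h2 : c = '"'
      · simp [h2, ih, List.flatten_append]
      · simp [h1, h2, ih, List.flatten_append]

-- B's loop state: pieces appended for rcs with initial flag d
def pvB1 : List Char → Bool → List (List Char)
  | [], _ => []
  | c :: r, d =>
    if c = '\\' then (if d then ['\\', '\\'] else ['\\']) :: pvB1 r d
    else if c = '"' then ['"', '\\'] :: pvB1 r true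
    else [c] :: pvB1 r false

theorem pv_foldlB (rcs : List Char) : ∀ (P : List (List Char)) (d : Bool),
    (rcs.foldl pvStepB (P, d)).1 = P ++ pvB1 rcs d := by
  induction rcs with
  | nil => intro P d; simp [pvB1]
  | cons c r ih =>
    intro P d
    simp only [List.foldl_cons, pvStepB, pvB1]
    by_cases h1 : c = '\\'
    · simp [h1, ih]
    · by_cases h2 : c = '"' <;> simp [h1, h2, ih]

-- reading pvEfl off the end of the argument, one snoc case per character class
theorem pvEfl_snoc_bs (xs : List Char) : ∀ (n : Nat) (d : Bool),
    pvEfl (xs ++ ['\\']) n d = pvEfl xs n d ++ List.replicate (if d then 2 else 1) '\\' := by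
  induction xs with
  | nil =>
    intro n d
    cases d <;>
      simp [pvEfl, Nat.mul_succ, List.replicate_succ']
  | cons c t ih =>
    intro n d
    simp only [List.cons_append, pvEfl]
    by_cases h1 : c = '\\'
    · simp [h1, ih]
    · by_cases h2 : c = '"' <;> simp [h1, h2, ih]

theorem pvEfl_snoc_quote (xs : List Char) : ∀ (n : Nat) (d : Bool),
    pvEfl (xs ++ ['"']) n d = pvEfl xs n true ++ ['\\', '"'] := by
  induction xs with
  | nil =>
    intro n d
    simp only [List.nil_append, pvEfl, reduceIte, Nat.mul_zero, List.replicate_zero]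
    rw [List.replicate_succ']
    simp
  | cons c t ih =>
    intro n d
    simp only [List.cons_append, pvEfl]
    by_cases h1 : c = '\\'
    · simp [h1, ih]
    · by_cases h2 : c = '"' <;> simp [h1, h2, ih]

theorem pvEfl_snoc_other (xs : List Char) (c : Char) (h1 : c ≠ '\\') (h2 : c ≠ '"') :
    ∀ (n : Nat) (d : Bool), pvEfl (xs ++ [c]) n d = pvEfl xs n false ++ [c] := by
  induction xs with
  | nil =>
    intro n d
    simp [pvEfl, h1, h2]
  | cons x t ih =>
    intro n d
    simp only [List.cons_append, pvEfl]
    by_cases g1 : x = '\\'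
    · simp [g1, ih]
    · by_cases g2 : x = '"' <;> simp [g1, g2, ih]

-- B's reversed, flattened pieces are pvEfl of the original order
theorem pv_B1_spec (rcs : List Char) : ∀ (d : Bool),
    ((pvB1 rcs d).flatten).reverse = pvEfl rcs.reverse 0 d := by
  induction rcs with
  | nil => intro d; rfl
  | cons c r ih =>
    intro d
    simp only [pvB1, List.reverse_cons]
    by_cases h1 : c = '\\'
    · subst h1
      rw [if_pos rfl, pvEfl_snoc_bs]
      cases d <;> simp [ih]
    · by_cases h2 : c = '"'
      · subst h2
        rw [if_neg h1, if_pos rfl, pvEfl_snoc_quote]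
        simp [ih]
      · rw [if_neg h1, if_neg h2, pvEfl_snoc_other _ _ h1 h2]
        simp [ih]

-- per-argument agreement of the two quoting loops
theorem pv_arg_eq (arg : String) : pvEscArgA arg = pvQuoteArg arg := by
  show PySem.Chars.join [] _ = '"' :: (PySem.Chars.join [] _).reverse ++ ['"']
  rw [pv_join_nil, pv_join_nil, pv_foldlB, List.nil_append, pv_B1_spec,
    List.reverse_reverse, List.flatten_append]
  have h := pv_foldlA arg.toList [['"']] 0
  simp only [List.flatten_cons, List.flatten_nil, List.append_nil,
    List.append_assoc] at h ⊢
  simpa using h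

-- one single-character str.replace is a flatMap
theorem pv_replace_go (c : Char) (new : List Char) (s : List Char) :
    ∀ (fuel : Nat) (acc : List Char), s.length ≤ fuel →
    PySem.Chars.replace.go [c] new fuel s acc
      = acc.reverse ++ s.flatMap (fun x => if x = c then new else [x]) := by
  induction s with
  | nil =>
    intro fuel acc _
    cases fuel <;> simp [PySem.Chars.replace.go]
  | cons x t ih =>
    intro fuel acc h
    cases fuel with
    | zero => simp at h
    | succ f =>
      rw [PySem.Chars.replace.go]
      by_cases hx : x = c
      · subst hx
        simp only [List.isPrefixOf_cons₂, List.isPrefixOf_nil_left, Bool.and_true,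
          beq_self_eq_true, if_pos]
        simp only [List.length_cons, List.length_nil, Nat.zero_add, List.drop_succ_cons,
          List.drop_zero]
        rw [ih f _ (by simpa using h)]
        simp
      · have : ([c].isPrefixOf (x :: t)) = false := by
          simp [List.isPrefixOf_cons₂, (Ne.symm hx : c ≠ x)]
        rw [this]
        simp only [Bool.false_eq_true, if_neg, not_false_iff]
        rw [ih f _ (by simpa using h)]
        simp [hx]

theorem pv_replace_single (s : List Char) (c : Char) (new : List Char) :
    PySem.Chars.replace s [c] new = s.flatMap (fun x => if x = c then new else [x]) := by
  rw [PySem.Chars.replace]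
  simp only [List.isEmpty_cons, Bool.false_eq_true, if_neg, not_false_iff]
  rw [pv_replace_go c new s s.length [] (le_refl _)]
  simp

-- a chain of single-character flatMap substitutions acts independently on each character
theorem pv_chainL (L : List Char) : ∀ (s : List Char),
    L.foldl (fun t ch => t.flatMap (fun x => if x = ch then ['^', ch] else [x])) s
    = s.flatMap (fun y =>
        L.foldl (fun t ch => t.flatMap (fun x => if x = ch then ['^', ch] else [x])) [y]) := by
  induction L with
  | nil => intro s; simp
  | cons ch L ih =>
    intro s
    simp only [List.foldl_cons]
    rw [ih, List.flatMap_assoc]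
    congr 1
    funext y
    rw [ih]
    simp

-- the ten sequential replaces compose to the single-pass pvMetaEsc
theorem pv_meta_chain (s : List Char) :
    (['(', ')', '%', '!', '^', '"', '<', '>', '&', '|'].foldl
      (fun t ch => PySem.Chars.replace t [ch] ['^', ch]) s)
    = s.flatMap pvMetaEsc := by
  have hfn : ∀ y : Char,
      (['(', ')', '%', '!', '^', '"', '<', '>', '&', '|'].foldl
        (fun t ch => t.flatMap (fun x => if x = ch then ['^', ch] else [x])) [y])
      = pvMetaEsc y := by
    intro x
    by_cases h1 : x = '('
    · subst h1; decide
    by_cases h2 : x = ')'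
    · subst h2; decide
    by_cases h3 : x = '%'
    · subst h3; decide
    by_cases h4 : x = '!'
    · subst h4; decide
    by_cases h5 : x = '^'
    · subst h5; decide
    by_cases h6 : x = '"'
    · subst h6; decide
    by_cases h7 : x = '<'
    · subst h7; decide
    by_cases h8 : x = '>'
    · subst h8; decide
    by_cases h9 : x = '&'
    · subst h9; decide
    by_cases h10 : x = '|'
    · subst h10; decide
    simp [pvMetaEsc, h1, h2, h3, h4, h5, h6, h7, h8, h9, h10]
  simp only [pv_replace_single]
  rw [pv_chainL]
  simp only [hfn]

-- ===== VERDICT (by name: the statement is the Claim_ definition above) =====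
theorem bat_escape_spec : Claim_equal_bat_escape := by
  intro args _
  show bat_escape args = bat_escape_alt args
  simp only [bat_escape, bat_escape_alt, pv_meta_chain,
    PySem.List.foldl_append_singleton_eq_map, List.nil_append]
  rw [show args.map pvEscArgA = args.map pvQuoteArg from
    List.map_congr_left fun a _ => pv_arg_eq a]
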